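-- pv_equiv track=rewrite | github.com/lulidsnn/Estruturas-de-Dados-em-Python | Trabalho - ED/ARQUIVOS - TRABALHO/Questão 04/Q4_Validar_Expressoes.py | validar_expressao
-- ===== SOURCE A (Python) =====
-- def validar_expressao(expressao):
--     pilha = []
--     delimitador = {')': '(', ']': '[', '}': '{'}
--
--     for char in expressao:
--         # Verifica se o caractere é um delimitador de abertura
--         if char in '([{':
--             pilha.append(char)
--         # Verifica se o caractere é um delimitador de fechamento
--         elif char in ')]}':
--             if not pilha:
--                 return False  # Delimitador de fechamento sem abertura correspondente
--             top = pilha.pop()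
--             if delimitador[char] != top:
--                 return False  # Ordem incorreta dos delimitadores
--         # Verifica se é um caractere ASCII válido para uma expressão matemática ou literal permitido
--         elif not (char.isdigit() or char in '+-*/.^ ' or char in 'ABCDEFGHIJ' or char in 'abcdefghij'):
--             return False
--
--     # Certifica-se de que todos os delimitadores foram fechados
--     return not pilha
-- ===== SOURCE B (Python) =====
-- def validar_expressao(expressao):
--     # Pass 1: every character must be a bracket or an allowed expression character.
--     if not all(c in '()[]{}' or c.isdigit() or c in '+-*/.^ '
--                or c in 'ABCDEFGHIJ' or c in 'abcdefghij' for c in expressao):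
--         return False
--     # Pass 2: keep only the brackets, then cancel adjacent matched pairs
--     # until nothing changes; balanced iff everything cancels.
--     s = ''.join(c for c in expressao if c in '()[]{}')
--     while True:
--         t = s.replace('()', '').replace('[]', '').replace('{}', '')
--         if t == s:
--             return s == ''
--         s = t
-- ===== Notes on version B (the rewrite author's own statement) =====
-- stated objective: alternative
-- what changed: Replaces the explicit stack with a filter-then-cancel scheme: keep only the bracket characters, then repeatedly delete adjacent matched open-close bracket pairs until a fixed point; the expression is balanced iff the bracket string cancels to empty.
import Mathlib
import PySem

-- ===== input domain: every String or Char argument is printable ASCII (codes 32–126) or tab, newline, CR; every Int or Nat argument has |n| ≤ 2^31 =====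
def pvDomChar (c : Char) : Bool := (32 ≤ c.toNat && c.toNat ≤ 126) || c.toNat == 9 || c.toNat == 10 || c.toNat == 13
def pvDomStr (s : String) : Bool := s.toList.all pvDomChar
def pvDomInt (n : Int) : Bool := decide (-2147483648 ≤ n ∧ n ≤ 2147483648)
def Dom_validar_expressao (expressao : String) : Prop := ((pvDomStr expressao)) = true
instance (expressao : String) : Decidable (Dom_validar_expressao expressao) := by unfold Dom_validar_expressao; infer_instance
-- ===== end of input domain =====

-- B replaces A's explicit stack by filter-the-brackets + cancel adjacent matched
-- pairs to a fixed point (objective: alternative algorithm, same result).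

-- ===== PORT A =====
-- the dict {')':'(', ']':'[', '}':'{'}; only ever looked up at ')', ']', '}'
def delimA (c : Char) : Char :=
  if c = ')' then '(' else if c = ']' then '[' else '{'

-- A's loop; the Python stack's top (end of list) is the head of `pilha` here
def goA : List Char → List Char → Bool
  | [], pilha => pilha.isEmpty
  | c :: rest, pilha =>
    if c = '(' || c = '[' || c = '{' then
      goA rest (c :: pilha)
    else if c = ')' || c = ']' || c = '}' then
      match pilha with
      | [] => false
      | top :: pilha' => if delimA c ≠ top then false else goA rest pilha'
    else if !(c.isDigit || c = '+' || c = '-' || c = '*' || c = '/' || c = '.' || c = '^' || c = ' ' || c = 'A' || c = 'B' || c = 'C' || c = 'D' || c = 'E' || c = 'F' || c = 'G' || c = 'H' || c = 'I' || c = 'J' || c = 'a' || c = 'b' || c = 'c' || c = 'd' || c = 'e' || c = 'f' || c = 'g' || c = 'h' || c = 'i' || c = 'j') then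
      false
    else goA rest pilha

def validar_expressao (expressao : String) : Bool :=
  goA expressao.toList []

-- ===== PORT B =====
def isBrB (c : Char) : Bool :=
  c = '(' || c = ')' || c = '[' || c = ']' || c = '{' || c = '}'

def allowedB (c : Char) : Bool :=
  isBrB c || (c.isDigit || c = '+' || c = '-' || c = '*' || c = '/' || c = '.' || c = '^' || c = ' ' || c = 'A' || c = 'B' || c = 'C' || c = 'D' || c = 'E' || c = 'F' || c = 'G' || c = 'H' || c = 'I' || c = 'J' || c = 'a' || c = 'b' || c = 'c' || c = 'd' || c = 'e' || c = 'f' || c = 'g' || c = 'h' || c = 'i' || c = 'j')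

-- s.replace(ok, '') for a two-character pattern o,k: left-to-right, non-overlapping
def removePair (o k : Char) : List Char → List Char
  | [] => []
  | [a] => [a]
  | a :: b :: rest =>
    if a = o && b = k then removePair o k rest
    else a :: removePair o k (b :: rest)

-- one body of B's while-loop: .replace('()','').replace('[]','').replace('{}','')
def stepB (s : List Char) : List Char :=
  removePair '{' '}' (removePair '[' ']' (removePair '(' ')' s))

theorem removePair_length_le (o k : Char) (s : List Char) :
    (removePair o k s).length ≤ s.length := by
  fun_induction removePair o k s with
  | case1 => simp
  | case2 a => simp
  | case3 a b rest h ih => simp only [List.length_cons]; omega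
  | case4 a b rest h ih => simp only [List.length_cons] at ih ⊢; omega

theorem removePair_eq_or_lt (o k : Char) (s : List Char) :
    removePair o k s = s ∨ (removePair o k s).length < s.length := by
  fun_induction removePair o k s with
  | case1 => left; rfl
  | case2 a => left; rfl
  | case3 a b rest h ih =>
    right
    have := removePair_length_le o k rest
    simp only [List.length_cons]; omega
  | case4 a b rest h ih =>
    rcases ih with h' | h'
    · left; rw [h']
    · right; simp only [List.length_cons] at h' ⊢; omega

theorem stepB_lt {s : List Char} (h : stepB s ≠ s) : (stepB s).length < s.length := by
  unfold stepB at h ⊢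
  rcases removePair_eq_or_lt '(' ')' s with h1 | h1
  · rw [h1] at h ⊢
    rcases removePair_eq_or_lt '[' ']' s with h2 | h2
    · rw [h2] at h ⊢
      rcases removePair_eq_or_lt '{' '}' s with h3 | h3
      · exact absurd h3 h
      · exact h3
    · exact lt_of_le_of_lt (removePair_length_le _ _ _) h2
  · exact lt_of_le_of_lt (le_trans (removePair_length_le _ _ _) (removePair_length_le _ _ _)) h1

-- B's while-loop: iterate stepB until it no longer changes the string
def reduceB (s : List Char) : List Char :=
  if h : stepB s = s then s else reduceB (stepB s)
termination_by s.length
decreasing_by exact stepB_lt h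

def validar_expressao_alt (expressao : String) : Bool :=
  if expressao.toList.all allowedB then
    decide (reduceB (expressao.toList.filter isBrB) = [])
  else false

-- ===== PRECONDITION & SPEC =====
def Spec_validar_expressao (expressao : String) (out : Bool) : Prop := out = validar_expressao_alt expressao
instance (expressao : String) (out : Bool) : Decidable (Spec_validar_expressao expressao out) := by unfold Spec_validar_expressao; infer_instance

-- ===== CLAIM (what is proved, stated in full; the proofs are below) =====
def Claim_equal_validar_expressao : Prop := ∀ (expressao : String), Dom_validar_expressao expressao → Spec_validar_expressao expressao (validar_expressao expressao)

-- ===== LEMMAS AND PROOFS =====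

-- the stack run of A, as a total function returning the final stack (none = early False)
def runS : List Char → List Char → Option (List Char)
  | [], st => some st
  | c :: rest, st =>
    if c = '(' || c = '[' || c = '{' then runS rest (c :: st)
    else if c = ')' || c = ']' || c = '}' then
      match st with
      | [] => none
      | t :: st' => if delimA c = t then runS rest st' else none
    else runS rest st

-- `s` contains the adjacent two-character substring o,k
def hasPair (o k : Char) : List Char → Bool
  | a :: b :: rest => (a = o && b = k) || hasPair o k (b :: rest)
  | _ => false

def isCloseB (c : Char) : Bool := c = ')' || c = ']' || c = '}'

theorem notBr_open {c : Char} (hb : isBrB c = false) :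
    (c = '(' || c = '[' || c = '{') = false := by
  simp only [isBrB, Bool.or_eq_false_iff] at hb ⊢
  tauto

theorem notBr_close {c : Char} (hb : isBrB c = false) :
    (c = ')' || c = ']' || c = '}') = false := by
  simp only [isBrB, Bool.or_eq_false_iff] at hb ⊢
  tauto

theorem br_of_classes {c : Char}
    (h1 : (c = '(' || c = '[' || c = '{') = false)
    (h2 : (c = ')' || c = ']' || c = '}') = false) : isBrB c = false := by
  simp only [Bool.or_eq_false_iff] at h1 h2
  simp only [isBrB, Bool.or_eq_false_iff]
  tauto

theorem isBrB_split (c : Char) : isBrB c =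
    ((c = '(' || c = '[' || c = '{') || (c = ')' || c = ']' || c = '}')) := by
  rw [Bool.eq_iff_iff]
  simp only [isBrB, Bool.or_eq_true]
  tauto

theorem allowedB_eq (c : Char) : allowedB c =
    ((c = '(' || c = '[' || c = '{') || (c = ')' || c = ']' || c = '}') ||
      (c.isDigit || c = '+' || c = '-' || c = '*' || c = '/' || c = '.' || c = '^' || c = ' ' || c = 'A' || c = 'B' || c = 'C' || c = 'D' || c = 'E' || c = 'F' || c = 'G' || c = 'H' || c = 'I' || c = 'J' || c = 'a' || c = 'b' || c = 'c' || c = 'd' || c = 'e' || c = 'f' || c = 'g' || c = 'h' || c = 'i' || c = 'j')) := by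
  rw [allowedB, isBrB_split, Bool.or_assoc]

theorem goA_char (l : List Char) : ∀ st, goA l st =
    (l.all allowedB && decide (runS l st = some [])) := by
  induction l with
  | nil => intro st; cases st <;> simp [goA, runS]
  | cons c rest ih =>
    intro st
    by_cases hO : (c = '(' || c = '[' || c = '{') = true
    · simp [goA, runS, hO, allowedB_eq, ih]
    · by_cases hC : (c = ')' || c = ']' || c = '}') = true
      · cases st with
        | nil => simp [goA, runS, hO, hC]
        | cons t st' =>
          by_cases hd : delimA c = t
          · simp [goA, runS, hO, hC, hd, allowedB_eq, ih]
          · simp [goA, runS, hO, hC, hd]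
      · have hbr : isBrB c = false :=
          br_of_classes (by simpa using hO) (by simpa using hC)
        by_cases hX : (c.isDigit || c = '+' || c = '-' || c = '*' || c = '/' || c = '.' || c = '^' || c = ' ' || c = 'A' || c = 'B' || c = 'C' || c = 'D' || c = 'E' || c = 'F' || c = 'G' || c = 'H' || c = 'I' || c = 'J' || c = 'a' || c = 'b' || c = 'c' || c = 'd' || c = 'e' || c = 'f' || c = 'g' || c = 'h' || c = 'i' || c = 'j') = true
        · simp [goA, runS, hO, hC, hX, allowedB_eq, ih]
        · simp [goA, runS, hO, hC, hX, allowedB_eq]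

theorem runS_removePair {o k : Char}
    (hoO : (o = '(' || o = '[' || o = '{') = true)
    (hkO : (k = '(' || k = '[' || k = '{') = false)
    (hkC : (k = ')' || k = ']' || k = '}') = true)
    (hd : delimA k = o) (s : List Char) :
    ∀ st, runS (removePair o k s) st = runS s st := by
  fun_induction removePair o k s with
  | case1 => intro st; rfl
  | case2 a => intro st; rfl
  | case3 a b rest h ih =>
    intro st
    obtain ⟨ha, hb⟩ : a = o ∧ b = k := by simpa using h
    subst ha hb
    rw [ih]
    simp [runS, hoO, hkO, hkC, hd]
  | case4 a b rest h ih =>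
    intro st
    by_cases h1 : (a = '(' || a = '[' || a = '{') = true
    · simp only [runS, h1, if_pos]
      exact ih _
    · by_cases h2 : (a = ')' || a = ']' || a = '}') = true
      · cases st with
        | nil => simp [runS, h1, h2]
        | cons t st' =>
          by_cases h3 : delimA a = t
          · simp [runS, h1, h2, h3, ih]
          · simp [runS, h1, h2, h3]
      · simp [runS, h1, h2, ih]

theorem runS_stepB (s : List Char) (st : List Char) : runS (stepB s) st = runS s st := by
  unfold stepB
  rw [runS_removePair (by decide) (by decide) (by decide) (by decide),
      runS_removePair (by decide) (by decide) (by decide) (by decide),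
      runS_removePair (by decide) (by decide) (by decide) (by decide)]

theorem runS_reduceB (s : List Char) : ∀ st, runS (reduceB s) st = runS s st := by
  fun_induction reduceB s with
  | case1 s h => intro st; rfl
  | case2 s h ih => intro st; rw [ih st, runS_stepB]

theorem reduceB_fix (s : List Char) : stepB (reduceB s) = reduceB s := by
  fun_induction reduceB s with
  | case1 s h => exact h
  | case2 s h ih => exact ih

theorem hasPair_lt {o k : Char} {s : List Char} (hp : hasPair o k s = true) :
    (removePair o k s).length < s.length := by
  fun_induction removePair o k s with
  | case1 => simp [hasPair] at hp
  | case2 a => simp [hasPair] at hp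
  | case3 a b rest h ih =>
    have := removePair_length_le o k rest
    simp only [List.length_cons]; omega
  | case4 a b rest h ih =>
    have hp' : hasPair o k (b :: rest) = true := by
      have := hp
      simp only [hasPair, Bool.or_eq_true] at this
      rcases this with h' | h'
      · exact absurd h' h
      · exact h'
    have := ih hp'
    simp only [List.length_cons] at this ⊢; omega

theorem fix_no_pair {o k : Char} {s : List Char} (h : removePair o k s = s) :
    hasPair o k s = false := by
  by_contra hp
  simp only [Bool.not_eq_false] at hp
  have := hasPair_lt hp
  rw [h] at this
  omega

theorem mem_removePair {o k c : Char} {s : List Char} (h : c ∈ removePair o k s) : c ∈ s := by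
  fun_induction removePair o k s with
  | case1 => exact h
  | case2 a => exact h
  | case3 a b rest hc ih => simp only [List.mem_cons]; right; right; exact ih h
  | case4 a b rest hc ih =>
    simp only [List.mem_cons] at h ⊢
    rcases h with h | h
    · exact Or.inl h
    · have := ih h
      simp only [List.mem_cons] at this
      tauto

theorem all_removePair {o k : Char} {p : Char → Bool} {s : List Char}
    (h : s.all p = true) : (removePair o k s).all p = true := by
  simp only [List.all_eq_true] at h ⊢
  exact fun c hc => h c (mem_removePair hc)

theorem allBr_reduceB {s : List Char} (h : s.all isBrB = true) :
    (reduceB s).all isBrB = true := by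
  fun_induction reduceB s with
  | case1 s h' => exact h
  | case2 s h' ih => exact ih (all_removePair (all_removePair (all_removePair h)))

theorem stepB_fix_components {s : List Char} (h : stepB s = s) :
    removePair '(' ')' s = s ∧ removePair '[' ']' s = s ∧ removePair '{' '}' s = s := by
  have l2 := removePair_length_le '[' ']' (removePair '(' ')' s)
  have l3 := removePair_length_le '{' '}' (removePair '[' ']' (removePair '(' ')' s))
  have hlen : (stepB s).length = s.length := by rw [h]
  unfold stepB at hlen
  have e1 : removePair '(' ')' s = s := by
    rcases removePair_eq_or_lt '(' ')' s with h1 | h1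
    · exact h1
    · omega
  rw [e1] at hlen l3 ⊢
  have e2 : removePair '[' ']' s = s := by
    rcases removePair_eq_or_lt '[' ']' s with h2 | h2
    · exact h2
    · omega
  rw [e2] at hlen ⊢
  have e3 : removePair '{' '}' s = s := by
    rcases removePair_eq_or_lt '{' '}' s with h3 | h3
    · exact h3
    · omega
  exact ⟨rfl, rfl, e3⟩

theorem hasPair_cons_false {o k c : Char} {t : List Char}
    (h : hasPair o k (c :: t) = false) : hasPair o k t = false := by
  cases t with
  | nil => rfl
  | cons d t' =>
    simp only [hasPair, Bool.or_eq_false_iff] at h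
    exact h.2

theorem closers_of_fix (s : List Char) : ∀ st, s.all isBrB = true →
    hasPair '(' ')' s = false → hasPair '[' ']' s = false → hasPair '{' '}' s = false →
    runS s st = some [] → s.all isCloseB = true := by
  induction s with
  | nil => intro st _ _ _ _ _; rfl
  | cons c t ih =>
    intro st hbr h1 h2 h3 hr
    have hbrc : isBrB c = true := by
      simp only [List.all_cons, Bool.and_eq_true] at hbr
      exact hbr.1
    have hbrt : t.all isBrB = true := by
      simp only [List.all_cons, Bool.and_eq_true] at hbr
      exact hbr.2
    have hcls : isBrB c = true := hbrc
    simp only [isBrB, Bool.or_eq_true, decide_eq_true_eq] at hcls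
    -- c is one of the six brackets; handle closers and openers separately
    rcases hcls with ((((hc | hc) | hc) | hc) | hc) | hc
    all_goals subst hc
    -- c = '(' : opener
    · exfalso
      cases t with
      | nil => simp [runS] at hr
      | cons d t' =>
        have hall := ih ('(' :: st) hbrt (hasPair_cons_false h1) (hasPair_cons_false h2)
          (hasPair_cons_false h3) (by simpa [runS] using hr)
        have hd : isCloseB d = true := by
          simp only [List.all_cons, Bool.and_eq_true] at hall
          exact hall.1
        simp only [isCloseB, Bool.or_eq_true, decide_eq_true_eq] at hd
        rcases hd with (hd | hd) | hd <;> subst hd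
        · simp [hasPair] at h1
        · simp [runS, delimA] at hr
        · simp [runS, delimA] at hr
    -- c = ')' : closer
    · cases st with
      | nil => simp [runS] at hr
      | cons t0 st' =>
        by_cases hd : delimA ')' = t0
        · have hr' : runS t st' = some [] := by simpa [runS, hd] using hr
          have := ih st' hbrt (hasPair_cons_false h1) (hasPair_cons_false h2)
            (hasPair_cons_false h3) hr'
          simp [List.all_cons, this, isCloseB]
        · simp [runS, hd] at hr
    -- c = '[' : opener
    · exfalso
      cases t with
      | nil => simp [runS] at hr
      | cons d t' =>
        have hall := ih ('[' :: st) hbrt (hasPair_cons_false h1) (hasPair_cons_false h2)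
          (hasPair_cons_false h3) (by simpa [runS] using hr)
        have hd : isCloseB d = true := by
          simp only [List.all_cons, Bool.and_eq_true] at hall
          exact hall.1
        simp only [isCloseB, Bool.or_eq_true, decide_eq_true_eq] at hd
        rcases hd with (hd | hd) | hd <;> subst hd
        · simp [runS, delimA] at hr
        · simp [hasPair] at h2
        · simp [runS, delimA] at hr
    -- c = ']' : closer
    · cases st with
      | nil => simp [runS] at hr
      | cons t0 st' =>
        by_cases hd : delimA ']' = t0
        · have hr' : runS t st' = some [] := by simpa [runS, hd] using hr
          have := ih st' hbrt (hasPair_cons_false h1) (hasPair_cons_false h2)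
            (hasPair_cons_false h3) hr'
          simp [List.all_cons, this, isCloseB]
        · simp [runS, hd] at hr
    -- c = '{' : opener
    · exfalso
      cases t with
      | nil => simp [runS] at hr
      | cons d t' =>
        have hall := ih ('{' :: st) hbrt (hasPair_cons_false h1) (hasPair_cons_false h2)
          (hasPair_cons_false h3) (by simpa [runS] using hr)
        have hd : isCloseB d = true := by
          simp only [List.all_cons, Bool.and_eq_true] at hall
          exact hall.1
        simp only [isCloseB, Bool.or_eq_true, decide_eq_true_eq] at hd
        rcases hd with (hd | hd) | hd <;> subst hd
        · simp [runS, delimA] at hr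
        · simp [runS, delimA] at hr
        · simp [hasPair] at h3
    -- c = '}' : closer
    · cases st with
      | nil => simp [runS] at hr
      | cons t0 st' =>
        by_cases hd : delimA '}' = t0
        · have hr' : runS t st' = some [] := by simpa [runS, hd] using hr
          have := ih st' hbrt (hasPair_cons_false h1) (hasPair_cons_false h2)
            (hasPair_cons_false h3) hr'
          simp [List.all_cons, this, isCloseB]
        · simp [runS, hd] at hr

theorem reduceB_empty_iff {s : List Char} (h : s.all isBrB = true) :
    (reduceB s = []) ↔ (runS s [] = some []) := by
  constructor
  · intro h0
    have := runS_reduceB s []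
    rw [h0] at this
    exact this.symm
  · intro hr
    have hfix := reduceB_fix s
    obtain ⟨e1, e2, e3⟩ := stepB_fix_components hfix
    have hb := allBr_reduceB h
    have hr' : runS (reduceB s) [] = some [] := by rw [runS_reduceB]; exact hr
    have hcl := closers_of_fix (reduceB s) [] hb (fix_no_pair e1) (fix_no_pair e2)
      (fix_no_pair e3) hr'
    cases hcl0 : reduceB s with
    | nil => rfl
    | cons c t =>
      rw [hcl0] at hr' hcl
      have hc : isCloseB c = true := by
        simp only [List.all_cons, Bool.and_eq_true] at hcl
        exact hcl.1
      simp only [isCloseB, Bool.or_eq_true, decide_eq_true_eq] at hc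
      rcases hc with (hc | hc) | hc <;> subst hc <;> simp [runS] at hr'

theorem runS_filter (l : List Char) : ∀ st, runS (l.filter isBrB) st = runS l st := by
  induction l with
  | nil => intro st; rfl
  | cons c rest ih =>
    intro st
    by_cases hb : isBrB c = true
    · rw [List.filter_cons_of_pos hb]
      by_cases h1 : (c = '(' || c = '[' || c = '{') = true
      · simp [runS, h1, ih]
      · by_cases h2 : (c = ')' || c = ']' || c = '}') = true
        · cases st with
          | nil => simp [runS, h1, h2]
          | cons t st' =>
            by_cases h3 : delimA c = t
            · simp [runS, h1, h2, h3, ih]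
            · simp [runS, h1, h2, h3]
        · exact absurd hb (by simp [br_of_classes (by simpa using h1) (by simpa using h2)])
    · rw [List.filter_cons_of_neg hb]
      rw [ih]
      have hb' : isBrB c = false := by simpa using hb
      simp [runS, notBr_open hb', notBr_close hb']

-- ===== VERDICT (by name: the statement is the Claim_ definition above) =====
theorem validar_expressao_spec : Claim_equal_validar_expressao := by
  intro e _
  unfold Spec_validar_expressao validar_expressao validar_expressao_alt
  rw [goA_char]
  by_cases hall : e.toList.all allowedB = true
  · simp only [hall, if_pos, Bool.true_and]
    have hbr : (e.toList.filter isBrB).all isBrB = true := by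
      simp [List.all_eq_true]
    rw [decide_eq_decide, ← runS_filter e.toList []]
    exact (reduceB_empty_iff hbr).symm
  · simp [hall]
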